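-- pv_equiv track=rewrite | github.com/saurabh-pandey/EPIJudgeClone | epi_judge_python/permutations.py | permutations_v1
-- ===== SOURCE A (Python) =====
-- from typing import List
--
-- def permutations_v1(A: List[int]) -> List[List[int]]:
--     '''
--     My version
--     '''
--     def permutations_recursive(count: int) -> None:
--         if count == len(A):
--             permutations.append(permutation[:])
--             return
--         for i, a in enumerate(A):
--             if i not in looked_indices:
--                 looked_indices.add(i)
--                 permutation[count] = a
--                 permutations_recursive(count + 1)
--                 looked_indices.remove(i)
--                 permutation[count] = 0
--     permutations = []
--     permutation = [0] * len(A)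
--     looked_indices = set()
--     permutations_recursive(0)
--     return permutations
-- ===== SOURCE B (Python) =====
-- from typing import List
--
-- def permutations_v1(A: List[int]) -> List[List[int]]:
--     def helper(lst):
--         if not lst:
--             return [[]]
--         out = []
--         for i in range(len(lst)):
--             for p in helper(lst[:i] + lst[i + 1:]):
--                 out.append([lst[i]] + p)
--         return out
--     return helper(A)
-- ===== Notes on version B (the rewrite author's own statement) =====
-- stated objective: alternative
-- what changed: Replaces the backtracking recursion over a mutated shared array plus a looked-indices set with a pure recursive helper that builds all permutations of each sublist bottom-up (remove element i, permute the rest, prepend).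
import Mathlib
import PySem

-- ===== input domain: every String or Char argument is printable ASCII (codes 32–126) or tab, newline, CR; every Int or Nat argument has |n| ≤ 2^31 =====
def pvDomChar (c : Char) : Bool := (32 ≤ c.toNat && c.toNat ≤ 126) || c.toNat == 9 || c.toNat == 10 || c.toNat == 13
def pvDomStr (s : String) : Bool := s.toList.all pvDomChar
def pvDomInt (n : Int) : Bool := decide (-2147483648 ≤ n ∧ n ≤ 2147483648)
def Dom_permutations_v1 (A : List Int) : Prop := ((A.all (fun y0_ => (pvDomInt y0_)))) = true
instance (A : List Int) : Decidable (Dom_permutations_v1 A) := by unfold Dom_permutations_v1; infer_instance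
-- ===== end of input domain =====

-- B replaces A's backtracking over a mutated shared array + looked-index set with a pure
-- recursive helper building permutations of sublists bottom-up (alternative decomposition, same cost).


-- ===== PORT A =====
-- 'permutations_recursive': the mutated state (permutation array, looked set, output list) is
-- threaded functionally; mutations are undone by A after each recursive call, so passing the
-- unmodified values onward is exact. fuel (= len(A)+1 at the top call) only makes the recursion
-- total: Python's recursion depth is len(A)-count, so fuel never runs out on the actual calls.
def permRecA (A : List Int) (fuel : Nat) (count : Nat) (perm : List Int)
    (looked : PySem.Set Int) (acc : List (List Int)) : List (List Int) :=
  match fuel with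
  | 0 => acc
  | fuel + 1 =>
    if count = A.length then
      acc ++ [perm]                                   -- permutations.append(permutation[:])
    else
      (PySem.List.enumerate A).foldl                  -- for i, a in enumerate(A)
        (fun acc' ia =>
          if PySem.Set.contains looked ia.1 = false then   -- if i not in looked_indices
            permRecA A fuel (count + 1)
              (PySem.List.pySetD perm (count : Int) ia.2)  -- permutation[count] = a
              (PySem.Set.add looked ia.1)                  -- looked_indices.add(i)
              acc'
          else acc')
        acc

def permutations_v1 (A : List Int) : List (List Int) :=
  permRecA A (A.length + 1) 0 (List.replicate A.length 0) PySem.Set.empty []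

-- ===== PORT B =====
-- helper(lst): [] -> [[]]; else for i in range(len(lst)), prepend lst[i] to every permutation
-- of lst[:i] + lst[i+1:].  (lst[i] with 0 <= i < len is List.getD; the slices are take/drop.)
def permsHelper (l : List Int) : List (List Int) :=
  if l = [] then [[]]
  else
    (List.range l.length).attach.foldl
      (fun out i =>
        out ++ (permsHelper (l.take i.1 ++ l.drop (i.1 + 1))).map (fun p => l.getD i.1 0 :: p))
      []
termination_by l.length
decreasing_by
  have hi := List.mem_range.mp i.2
  simp only [List.length_append, List.length_take, List.length_drop]
  omega

def permutations_v1_alt (A : List Int) : List (List Int) := permsHelper A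

-- ===== PRECONDITION & SPEC =====
def Spec_permutations_v1 (A : List Int) (out : List (List Int)) : Prop := out = permutations_v1_alt A
instance (A : List Int) (out : List (List Int)) : Decidable (Spec_permutations_v1 A out) := by unfold Spec_permutations_v1; infer_instance

-- ===== CLAIM (what is proved, stated in full; the proofs are below) =====
def Claim_equal_permutations_v1 : Prop := ∀ (A : List Int), Dom_permutations_v1 A → Spec_permutations_v1 A (permutations_v1 A)

-- ===== LEMMAS AND PROOFS =====

-- the indices of A not yet in 'looked', in increasing order (exactly the filter the
-- enumerate-loop of A performs)
def availOf (n : Nat) (looked : PySem.Set Int) : List Nat :=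
  (List.range n).filter (fun i => decide (PySem.Set.contains looked (i : Int) = false))

lemma availOf_nodup (n : Nat) (looked : PySem.Set Int) : (availOf n looked).Nodup :=
  (List.nodup_range).filter _

lemma contains_eq_false_iff (s : PySem.Set Int) (y : Int) :
    (PySem.Set.contains s y = false) ↔ y ∉ s := by
  rw [← PySem.Set.contains_iff]
  cases PySem.Set.contains s y <;> simp

lemma availOf_add (n : Nat) (looked : PySem.Set Int) (x : Nat) :
    availOf n (PySem.Set.add looked (x : Int))
      = (availOf n looked).filter (fun j => decide (j ≠ x)) := by
  unfold availOf
  rw [List.filter_filter]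
  apply List.filter_congr
  intro k _
  rw [← Bool.decide_and, decide_eq_decide]
  rw [contains_eq_false_iff, contains_eq_false_iff, PySem.Set.mem_add]
  simp [not_or, and_comm]

lemma map_getD_range {α : Type} (l : List α) (d : α) :
    (List.range l.length).map (fun j => l.getD j d) = l := by
  apply List.ext_getElem
  · simp
  · intro i h1 h2
    simp [List.getElem?_eq_getElem h2]

lemma filter_ne_getElem (l : List Nat) (h : l.Nodup) (j : Nat) (hj : j < l.length) :
    l.filter (fun x => decide (x ≠ l[j])) = l.take j ++ l.drop (j + 1) := by
  induction l generalizing j with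
  | nil => simp at hj
  | cons a t ih =>
    rcases List.nodup_cons.mp h with ⟨ha, ht⟩
    cases j with
    | zero =>
      simp only [List.getElem_cons_zero, List.take_zero, List.drop_succ_cons, List.drop_zero,
        List.nil_append, List.filter_cons]
      simp only [ne_eq, not_true_eq_false, decide_false]
      exact List.filter_eq_self.mpr (fun x hx => by
        simp only [decide_eq_true_eq]; exact fun he => ha (he ▸ hx))
    | succ j =>
      have hj' : j < t.length := by simpa using hj
      have hat : a ≠ t[j] := fun he => ha (he ▸ t.getElem_mem hj')
      simp only [List.getElem_cons_succ, List.filter_cons, List.take_succ_cons,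
        List.drop_succ_cons, decide_eq_true_eq]
      rw [if_pos hat]
      simpa using ih ht j hj'

lemma length_filter_ne (l : List Nat) (h : l.Nodup) (x : Nat) (hx : x ∈ l) :
    (l.filter (fun j => decide (j ≠ x))).length + 1 = l.length := by
  obtain ⟨j, hj, rfl⟩ := List.mem_iff_getElem.mp hx
  rw [filter_ne_getElem l h j hj]
  simp only [List.length_append, List.length_take, List.length_drop]
  omega

lemma take_set_succ (l : List Int) (c : Nat) (v : Int) (h : c < l.length) :
    (l.set c v).take (c + 1) = l.take c ++ [v] := by
  induction l generalizing c with
  | nil => simp at h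
  | cons a t ih =>
    cases c with
    | zero => simp
    | succ c =>
      have h' : c < t.length := by simpa using h
      simp [ih c h']

lemma permsHelper_nil : permsHelper [] = [[]] := by
  rw [permsHelper]
  simp

-- one unfolding of permsHelper on a nonempty list, already in flatMap form over the value list
-- glue: a foldl that appends F (h x) for each x is a flatMap over the mapped list
lemma foldl_append_comp {α γ : Type} (F : γ → List (List Int)) (h : α → γ)
    (l : List α) (acc : List (List Int)) :
    l.foldl (fun acc x => acc ++ F (h x)) acc = acc ++ (l.map h).flatMap F := by
  rw [List.flatMap_map]
  exact PySem.List.foldl_append_eq_flatMap (fun x => F (h x)) l acc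

lemma permsHelper_eq_flatMap (av : List Nat) (hnd : av.Nodup) (val : Nat → Int)
    (hne : av ≠ []) :
    permsHelper (av.map val)
      = av.flatMap (fun x =>
          (permsHelper ((av.filter (fun j => decide (j ≠ x))).map val)).map
            (fun p => val x :: p)) := by
  have hmapne : av.map val ≠ [] := by simpa using hne
  rw [permsHelper, if_neg hmapne]
  have hcg : ∀ (out : List (List Int)), ∀ i ∈ (List.range (av.map val).length).attach,
      (out ++ (permsHelper ((av.map val).take i.1 ++ (av.map val).drop (i.1 + 1))).map
          (fun p => (av.map val).getD i.1 0 :: p))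
      = out ++ (permsHelper ((av.filter (fun j => decide (j ≠ av.getD i.1 0))).map val)).map
          (fun p => val (av.getD i.1 0) :: p) := by
    intro out i _
    have hj : i.1 < av.length := by
      have := List.mem_range.mp i.2; simpa using this
    have h2 : av.getD i.1 0 = av[i.1] := List.getD_eq_getElem av 0 hj
    have h1 : (av.map val).getD i.1 0 = val av[i.1] := by
      rw [List.getD_eq_getElem _ _ (by simpa using hj)]; simp
    have h3 : (av.map val).take i.1 ++ (av.map val).drop (i.1 + 1)
        = ((av.filter (fun j => decide (j ≠ av[i.1]))).map val) := by
      rw [filter_ne_getElem av hnd i.1 hj]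
      simp [← List.map_take, ← List.map_drop]
    rw [h1, h2, h3]
  rw [PySem.List.foldl_congr_mem _ _ _ [] hcg]
  have h5 := foldl_append_comp
    (fun x : Nat => (permsHelper ((av.filter (fun j => decide (j ≠ x))).map val)).map
        (fun p => val x :: p))
    (fun i : {x : Nat // x ∈ List.range (av.map val).length} => av.getD i.1 0)
    ((List.range (av.map val).length).attach) []
  rw [h5, List.nil_append,
    List.attach_map_val (l := List.range (av.map val).length) (f := fun j => av.getD j 0)]
  rw [show (List.range (av.map val).length).map (fun j => av.getD j 0) = av from by
    rw [List.length_map]; exact map_getD_range av 0]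

theorem permRec_eq (A : List Int) (fuel : Nat) :
    ∀ (looked : PySem.Set Int), looked.Nodup →
    ∀ (count : Nat) (perm : List Int) (acc : List (List Int)),
    (availOf A.length looked).length < fuel →
    count + (availOf A.length looked).length = A.length →
    perm.length = A.length →
    permRecA A fuel count perm looked acc
      = acc ++ (permsHelper ((availOf A.length looked).map (fun i => A.getD i 0))).map
          (fun p => perm.take count ++ p) := by
  induction fuel with
  | zero =>
    intro looked _ count perm acc hfuel _ _
    exact absurd hfuel (Nat.not_lt_zero _)
  | succ fuel ih =>
    intro looked hnd count perm acc hfuel hcount hperm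
    by_cases hc : count = A.length
    · have hav0 : availOf A.length looked = [] := List.length_eq_zero_iff.mp (by omega)
      rw [permRecA, if_pos hc, hav0]
      simp [permsHelper_nil, List.take_of_length_le (le_of_eq (hperm.trans hc.symm))]
    · have havpos : 0 < (availOf A.length looked).length := by
        rcases Nat.eq_zero_or_pos (availOf A.length looked).length with h0 | h
        · omega
        · exact h
      have havne : availOf A.length looked ≠ [] := by
        intro h0; rw [h0] at havpos; simp at havpos
      rw [permRecA, if_neg hc]
      rw [PySem.List.enumerate_eq_map_pyRange A 0, PySem.List.len_eq,
        PySem.List.pyRange_zero_natCast, List.map_map, List.foldl_map]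
      simp only [Function.comp, PySem.List.pySetD_natCast, PySem.List.pyGetD_natCast]
      rw [PySem.List.foldl_ite_eq_foldl_filter
        (fun k : Nat => PySem.Set.contains looked (k : Int) = false)]
      rw [show List.filter (fun x : Nat => decide (PySem.Set.contains looked (x : Int) = false))
            (List.range A.length)
          = availOf A.length looked from rfl]
      have hcg : ∀ (acc' : List (List Int)), ∀ x ∈ availOf A.length looked,
          permRecA A fuel (count + 1) (perm.set count (A.getD x 0))
              (PySem.Set.add looked (x : Int)) acc'
          = acc' ++ (permsHelper (((availOf A.length looked).filter
                (fun j => decide (j ≠ x))).map (fun i => A.getD i 0))).map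
                (fun p => perm.take count ++ (A.getD x 0 :: p)) := by
        intro acc' x hx
        have hadd := availOf_add A.length looked x
        have hlf := length_filter_ne (availOf A.length looked) (availOf_nodup _ _) x hx
        rw [ih (PySem.Set.add looked (x : Int)) (PySem.Set.nodup_add looked (x : Int) hnd)
            (count + 1) (perm.set count (A.getD x 0)) acc'
            (by rw [hadd]; omega) (by rw [hadd]; omega) (by simp [hperm])]
        rw [hadd, take_set_succ perm count (A.getD x 0) (by omega)]
        simp [List.append_assoc]
      rw [PySem.List.foldl_congr_mem _ _ _ acc hcg]
      have h5 := PySem.List.foldl_append_eq_flatMap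
        (fun x : Nat => (permsHelper (((availOf A.length looked).filter
            (fun j => decide (j ≠ x))).map (fun i => A.getD i 0))).map
            (fun p => perm.take count ++ (A.getD x 0 :: p)))
        (availOf A.length looked) acc
      rw [h5]
      rw [permsHelper_eq_flatMap (availOf A.length looked) (availOf_nodup _ _)
          (fun i => A.getD i 0) havne]
      rw [List.map_flatMap]
      simp [List.map_map, Function.comp_def]

-- ===== VERDICT (by name: the statement is the Claim_ definition above) =====
theorem permutations_v1_spec : Claim_equal_permutations_v1 := by
  intro A _
  unfold Spec_permutations_v1 permutations_v1 permutations_v1_alt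
  have hav : availOf A.length PySem.Set.empty = List.range A.length := by
    unfold availOf
    apply List.filter_eq_self.mpr
    intro k _
    simp [PySem.Set.contains, PySem.Set.empty]
  have hn : (availOf A.length PySem.Set.empty).length = A.length := by rw [hav]; simp
  rw [permRec_eq A (A.length + 1) PySem.Set.empty (by simp [PySem.Set.empty]) 0
      (List.replicate A.length 0) [] (by omega) (by omega) (by simp)]
  rw [hav, map_getD_range]
  simp
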